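-- pv_equiv track=rewrite | github.com/algo-1/timetable_scheduler | python/src/XHSTTS/xhstts.py | get_idle_times_count
-- ===== SOURCE A (Python) =====
-- def get_idle_times_count(resource_status: list[bool]):
--     first_true = False
--     count = 0
--     res = 0
--     for value in resource_status:
--         if value:
--             if not first_true:
--                 first_true = True
--             else:
--                 # add count to result and reset count
--                 res += count
--                 count = 0
--         else:
--             if first_true:
--                 count += 1
--     return res
-- ===== SOURCE B (Python) =====
-- def get_idle_times_count(resource_status: list[bool]):
--     if True not in resource_status:
--         return 0
--     first = resource_status.index(True)
--     last = len(resource_status) - 1 - resource_status[::-1].index(True)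
--     return sum(1 for v in resource_status[first:last + 1] if not v)
-- ===== Notes on version B (the rewrite author's own statement) =====
-- stated objective: alternative
-- what changed: Replaces A's single accumulate-and-flush state-machine pass with a boundary-finding phase (index of first and last True) followed by counting the False entries in the slice between them.
import Mathlib
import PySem

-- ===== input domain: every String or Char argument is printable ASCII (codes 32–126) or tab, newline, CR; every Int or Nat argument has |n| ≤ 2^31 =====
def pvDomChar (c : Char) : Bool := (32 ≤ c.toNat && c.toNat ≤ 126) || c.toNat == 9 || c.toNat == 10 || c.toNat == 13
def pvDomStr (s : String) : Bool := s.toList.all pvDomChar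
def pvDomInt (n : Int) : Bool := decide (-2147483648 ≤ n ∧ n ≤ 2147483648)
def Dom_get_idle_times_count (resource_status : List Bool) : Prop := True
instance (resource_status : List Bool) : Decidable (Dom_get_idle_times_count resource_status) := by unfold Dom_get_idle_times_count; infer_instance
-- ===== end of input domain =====

-- B replaces A's accumulate-and-flush state-machine pass with boundary finding (first/last True)
-- plus a separate count of False in the slice between them; same O(n) cost, different decomposition.

-- ===== PORT A =====
-- A's loop state (first_true, count, res); one step of A's for-loop body.
def pvAStep (st : Bool × Int × Int) (value : Bool) : Bool × Int × Int :=
  let (first_true, count, res) := st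
  if value then
    if !first_true then (true, count, res)
    else (true, 0, res + count)
  else
    if first_true then (first_true, count + 1, res)
    else (first_true, count, res)

def get_idle_times_count (resource_status : List Bool) : Int :=
  (resource_status.foldl pvAStep (false, 0, 0)).2.2

-- ===== PORT B =====
def get_idle_times_count_alt (resource_status : List Bool) : Int :=
  if true ∈ resource_status then
    match PySem.List.index? resource_status true,
          PySem.List.index? resource_status.reverse true with  -- xs[::-1] is reverse (PySem.List.slice?_none_none_neg_one)
    | some first, some ridx =>
        let last : Int := (resource_status.length : Int) - 1 - (ridx : Int)
        (PySem.List.slice resource_status (some (first : Int)) (some (last + 1))).foldl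
          (fun acc v => if !v then acc + 1 else acc) 0   -- sum(1 for v in slice if not v)
    | _, _ => 0
  else 0

-- ===== PRECONDITION & SPEC =====
def Spec_get_idle_times_count (resource_status : List Bool) (out : Int) : Prop := out = get_idle_times_count_alt resource_status
instance (resource_status : List Bool) (out : Int) : Decidable (Spec_get_idle_times_count resource_status out) := by unfold Spec_get_idle_times_count; infer_instance

-- ===== CLAIM (what is proved, stated in full; the proofs are below) =====
def Claim_equal_get_idle_times_count : Prop := ∀ (resource_status : List Bool), Dom_get_idle_times_count resource_status → Spec_get_idle_times_count resource_status (get_idle_times_count resource_status)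

-- ===== LEMMAS AND PROOFS =====

-- number of False entries before the last True of the list (0 if no True)
def pvG : List Bool → Int
  | [] => 0
  | true :: t => pvG t
  | false :: t => if true ∈ t then 1 + pvG t else 0

theorem pvG_zero (l : List Bool) (h : true ∉ l) : pvG l = 0 := by
  induction l with
  | nil => rfl
  | cons b t ih =>
    cases b with
    | true => exact absurd (List.mem_cons_self) h
    | false =>
      simp only [pvG]
      rw [if_neg (fun hm => h (List.mem_cons_of_mem _ hm))]

theorem pvG_mid (m q : List Bool) (hq : true ∉ q) :
    pvG (m ++ true :: q) = (m.countP (fun v => !v) : Int) := by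
  induction m with
  | nil => simp [pvG, pvG_zero q hq]
  | cons b t ih =>
    cases b with
    | true => simpa [pvG, List.countP_cons] using ih
    | false =>
      have hmem : true ∈ t ++ true :: q := by simp
      simp only [List.cons_append, pvG, if_pos hmem, ih, List.countP_cons]
      simp
      ring

theorem pvFoldA_skip (p : List Bool) (hp : true ∉ p) (rest : List Bool) :
    List.foldl pvAStep (false, 0, 0) (p ++ rest) = List.foldl pvAStep (false, 0, 0) rest := by
  induction p with
  | nil => rfl
  | cons b t ih =>
    cases b with
    | true => exact absurd (List.mem_cons_self) hp
    | false =>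
      simp only [List.cons_append, List.foldl_cons]
      have : pvAStep (false, 0, 0) false = (false, 0, 0) := rfl
      rw [this, ih (fun hm => hp (List.mem_cons_of_mem _ hm))]

theorem pvFoldA_true (l : List Bool) (c r : Int) :
    (List.foldl pvAStep (true, c, r) l).2.2 = if true ∈ l then r + c + pvG l else r := by
  induction l generalizing c r with
  | nil => simp
  | cons b t ih =>
    cases b with
    | true =>
      have hst : pvAStep (true, c, r) true = (true, 0, r + c) := rfl
      simp only [List.foldl_cons, hst, ih]
      by_cases hm : true ∈ t
      · simp [hm, pvG]
      · simp [hm, pvG, pvG_zero t hm]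
    | false =>
      have hst : pvAStep (true, c, r) false = (true, c + 1, r) := rfl
      simp only [List.foldl_cons, hst, ih]
      by_cases hm : true ∈ t
      · have hm' : true ∈ (false :: t) := List.mem_cons_of_mem _ hm
        simp only [if_pos hm, if_pos hm', pvG, if_pos hm]; ring
      · have hm' : true ∉ (false :: t) := by simp [hm]
        simp [hm, hm']

theorem pvIdx_first (p s : List Bool) (hp : true ∉ p) :
    PySem.List.index? (p ++ true :: s) true = some p.length := by
  rw [PySem.List.index?_eq_some_iff]
  exact ⟨p, s, rfl, rfl, hp⟩

theorem pvFirst_split (s : List Bool) (h : true ∈ s) :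
    ∃ p t, s = p ++ true :: t ∧ true ∉ p := by
  induction s with
  | nil => cases h
  | cons b t ih =>
    cases b with
    | true => exact ⟨[], t, rfl, by simp⟩
    | false =>
      have hm : true ∈ t := by simpa using h
      obtain ⟨p, t', rfl, hp⟩ := ih hm
      exact ⟨false :: p, t', rfl, by simp [hp]⟩

theorem pvLast_split (s : List Bool) (h : true ∈ s) :
    ∃ m q, s = m ++ true :: q ∧ true ∉ q := by
  obtain ⟨p, t, hrev, hp⟩ := pvFirst_split s.reverse (by simpa using h)
  refine ⟨t.reverse, p.reverse, ?_, by simpa using hp⟩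
  have := congrArg List.reverse hrev
  simpa using this

theorem pvCountFold (l : List Bool) (n : Int) :
    l.foldl (fun acc v => if !v then acc + 1 else acc) n = n + (l.countP (fun v => !v) : Int) := by
  induction l generalizing n with
  | nil => simp
  | cons b t ih =>
    cases b with
    | true =>
      simp only [List.foldl_cons]
      rw [ih]
      simp [List.countP_cons]
    | false =>
      simp only [List.foldl_cons]
      rw [ih]
      simp [List.countP_cons]
      ring

-- ===== VERDICT (by name: the statement is the Claim_ definition above) =====
theorem get_idle_times_count_spec : Claim_equal_get_idle_times_count := by
  intro l _
  unfold Spec_get_idle_times_count get_idle_times_count get_idle_times_count_alt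
  by_cases hm : true ∈ l
  · obtain ⟨p, s, rfl, hp⟩ := pvFirst_split l hm
    rw [if_pos hm, pvIdx_first p s hp]
    by_cases hs : true ∈ s
    · obtain ⟨m, q, rfl, hq⟩ := pvLast_split s hs
      have hrev : (p ++ true :: (m ++ true :: q)).reverse
          = q.reverse ++ true :: (m.reverse ++ true :: p.reverse) := by
        simp
      rw [hrev, pvIdx_first _ _ (by simpa using hq)]
      dsimp only
      have hlen : ((p ++ true :: (m ++ true :: q)).length : Int) - 1 - (q.reverse.length : Int) + 1
          = (p.length : Int) + ((m.length + 2 : Nat) : Int) := by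
        simp [List.length_append]
        push_cast; ring
      rw [hlen, PySem.List.slice_natCast_add]
      rw [List.drop_left]
      have htake : (true :: (m ++ true :: q)).take (m.length + 2) = true :: (m ++ [true]) := by
        have : (m ++ true :: q).take (m.length + 1) = m ++ [true] := by
          rw [show m.length + 1 = m.length + 1 from rfl, List.take_append]
          simp
        simp [List.take_succ_cons, this]
      rw [htake, pvCountFold]
      rw [pvFoldA_skip p hp, List.foldl_cons]
      have hst : pvAStep (false, 0, 0) true = (true, 0, 0) := rfl
      rw [hst, pvFoldA_true]
      rw [if_pos (show true ∈ m ++ true :: q by simp)]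
      rw [pvG_mid m q hq]
      simp [List.countP_cons, List.countP_append]
    · have hrev : (p ++ true :: s).reverse = s.reverse ++ true :: p.reverse := by simp
      rw [hrev, pvIdx_first _ _ (by simpa using hs)]
      dsimp only
      have hlen : ((p ++ true :: s).length : Int) - 1 - (s.reverse.length : Int) + 1
          = (p.length : Int) + ((1 : Nat) : Int) := by
        simp [List.length_append]
        push_cast; ring
      rw [hlen, PySem.List.slice_natCast_add]
      rw [List.drop_left]
      have htake : (true :: s).take 1 = [true] := by simp
      rw [htake, pvCountFold]
      rw [pvFoldA_skip p hp, List.foldl_cons]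
      have hst : pvAStep (false, 0, 0) true = (true, 0, 0) := rfl
      rw [hst, pvFoldA_true, if_neg hs]
      simp
  · rw [if_neg hm]
    have := pvFoldA_skip l hm []
    simp only [List.append_nil] at this
    rw [this]
    rfl
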